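-- pv_equiv track=rewrite | github.com/devMichael23/Diamond | main.py | clear_diamond
-- ===== SOURCE A (Python) =====
-- def delete_duplicates(ls: list[str], length: int):
--     for string in ls:
--         if string == '*' * length:
--             ls.remove(string)
--             break
--
-- def clear_diamond(ls: list[str], length: int) -> list[str]:
--     result = []
--     for string in ls:
--         if string == ' ' * length:
--             continue
--         else:
--             result.append(string)
--     delete_duplicates(result, length)
--     return result
-- ===== SOURCE B (Python) =====
-- def clear_diamond(ls: list[str], length: int) -> list[str]:
--     spaces = ' ' * length
--     stars = '*' * length
--     result = []
--     star_removed = False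
--     for string in ls:
--         if string == spaces:
--             continue
--         elif not star_removed and string == stars:
--             star_removed = True
--         else:
--             result.append(string)
--     return result
-- ===== Notes on version B (the rewrite author's own statement) =====
-- stated objective: faster
-- what changed: Single pass with a star_removed flag and precomputed space/star strings, replacing A's two passes (a filter that rebuilds ' '*length every iteration, then the mutating delete_duplicates scan with list.remove).
import Mathlib
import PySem

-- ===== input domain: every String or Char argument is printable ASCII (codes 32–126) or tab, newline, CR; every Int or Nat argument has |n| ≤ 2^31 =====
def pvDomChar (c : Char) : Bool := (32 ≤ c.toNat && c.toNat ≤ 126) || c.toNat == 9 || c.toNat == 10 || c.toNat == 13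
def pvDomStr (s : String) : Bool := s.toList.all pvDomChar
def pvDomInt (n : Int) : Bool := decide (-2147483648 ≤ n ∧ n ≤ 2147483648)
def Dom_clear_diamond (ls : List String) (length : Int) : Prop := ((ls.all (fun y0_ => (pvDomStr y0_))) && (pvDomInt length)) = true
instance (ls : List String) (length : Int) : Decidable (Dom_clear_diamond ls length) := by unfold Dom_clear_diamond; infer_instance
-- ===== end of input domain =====

-- B replaces A's two passes (filter then mutating delete_duplicates) by one pass with a star_removed flag; objective: simpler.


-- ===== PORT A =====
-- ' ' * length / '*' * length (Python string repetition; negative count gives '')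
def pvRepChar (c : Char) (n : Int) : String := String.mk (List.replicate n.toNat c)

-- the loop of delete_duplicates: scan ls, on the first string equal to '*'*length remove it (first occurrence) and break
def ddLoop (orig : List String) (stars : String) : List String → List String
  | [] => orig
  | s :: rest =>
    if s == stars then ((PySem.List.remove? orig s).getD orig) else ddLoop orig stars rest

def delete_duplicates (ls : List String) (length : Int) : List String :=
  ddLoop ls (pvRepChar '*' length) ls

def clear_diamond (ls : List String) (length : Int) : List String :=
  let result := ls.foldl (fun acc s => if s == pvRepChar ' ' length then acc else acc ++ [s]) []
  delete_duplicates result length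

-- ===== PORT B =====
-- single pass: skip space lines; skip the first star line (flag); keep the rest
def altLoop (spaces stars : String) : List String → Bool → List String
  | [], _ => []
  | s :: rest, starRemoved =>
    if s == spaces then altLoop spaces stars rest starRemoved
    else if !starRemoved && s == stars then altLoop spaces stars rest true
    else s :: altLoop spaces stars rest starRemoved

def clear_diamond_alt (ls : List String) (length : Int) : List String :=
  altLoop (pvRepChar ' ' length) (pvRepChar '*' length) ls false

-- ===== PRECONDITION & SPEC =====
def Spec_clear_diamond (ls : List String) (length : Int) (out : List String) : Prop := out = clear_diamond_alt ls length
instance (ls : List String) (length : Int) (out : List String) : Decidable (Spec_clear_diamond ls length out) := by unfold Spec_clear_diamond; infer_instance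

-- ===== CLAIM (what is proved, stated in full; the proofs are below) =====
def Claim_equal_clear_diamond : Prop := ∀ (ls : List String) (length : Int), Dom_clear_diamond ls length → Spec_clear_diamond ls length (clear_diamond ls length)

-- ===== LEMMAS AND PROOFS =====

theorem foldl_filter (spaces : String) (ls : List String) (acc : List String) :
    ls.foldl (fun acc s => if s == spaces then acc else acc ++ [s]) acc
      = acc ++ ls.filter (fun s => !(s == spaces)) := by
  induction ls generalizing acc with
  | nil => simp
  | cons s rest ih =>
    simp only [List.foldl_cons, List.filter_cons]
    by_cases h : (s == spaces) = true
    · rw [if_pos h, ih]; simp [h]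
    · rw [if_neg h, ih]; simp [eq_false_of_ne_true h]

-- the delete_duplicates loop computes List.erase (first occurrence, no-op if absent)
theorem ddLoop_eq (orig : List String) (stars : String) (l : List String) :
    ddLoop orig stars l = if stars ∈ l then orig.erase stars else orig := by
  induction l with
  | nil => simp [ddLoop]
  | cons s rest ih =>
    by_cases h : s = stars
    · subst h
      simp only [ddLoop, beq_self_eq_true, if_true, List.mem_cons, true_or, if_true]
      by_cases hm : s ∈ orig
      · rw [PySem.List.remove?_eq_some_erase (xs := orig) (v := s) hm]; rfl
      · have h0 : PySem.List.remove? orig s = none :=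
          (PySem.List.remove?_eq_none_iff orig s).2 hm
        simp [h0, List.erase_of_not_mem hm]
    · have hb : (s == stars) = false := by simpa using h
      simp [ddLoop, hb, ih, Ne.symm h]

-- B with the flag set keeps exactly the non-space lines
theorem altLoop_true (spaces stars : String) (ls : List String) :
    altLoop spaces stars ls true = ls.filter (fun s => !(s == spaces)) := by
  induction ls with
  | nil => rfl
  | cons s rest ih =>
    by_cases h : s = spaces
    · simp [altLoop, h, ih]
    · have hb : (s == spaces) = false := by simpa using h
      simp [altLoop, hb, ih]

-- B with the flag clear erases the first star line from the filtered list
theorem altLoop_false (spaces stars : String) (ls : List String) :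
    altLoop spaces stars ls false
      = (ls.filter (fun s => !(s == spaces))).erase stars := by
  induction ls with
  | nil => rfl
  | cons s rest ih =>
    by_cases hsp : s = spaces
    · simp [altLoop, hsp, ih]
    · have hb : (s == spaces) = false := by simpa using hsp
      by_cases hst : s = stars
      · subst hst
        simp [altLoop, hb, altLoop_true, List.erase_cons_head]
      · have hb2 : (s == stars) = false := by simpa using hst
        simp [altLoop, hb, hb2, ih, List.erase_cons_tail]

-- ===== VERDICT (by name: the statement is the Claim_ definition above) =====
theorem clear_diamond_spec : Claim_equal_clear_diamond := by
  intro ls length _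
  unfold Spec_clear_diamond clear_diamond clear_diamond_alt delete_duplicates
  rw [foldl_filter, ddLoop_eq, altLoop_false]
  simp only [List.nil_append]
  split_ifs with h
  · rfl
  · rw [List.erase_of_not_mem h]
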